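-- pv_equiv track=rewrite | github.com/Ahmed3120/python | prior.py | merageData
-- ===== SOURCE A (Python) =====
-- from collections import OrderedDict
--
-- def hasTheChars(subString, word):
--     isFound = False
--     for i in subString:
--
--         if i in word:
--             isFound = True
--         else:
--             return False
--     return isFound
--
-- def removeRepeatedChars(s):
--     #using orderdDict methods to remove the repeated chars
--     return "".join(OrderedDict.fromkeys(s))
--
-- def merageData(a, data):
--     b = {}
--     for i in a:
--         for j in a:
--             if i != j and i + j not in b.keys() and j + i not in b.keys():
--                 newWord = removeRepeatedChars(i + j)
--                 b[newWord] = 0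
--     for i in b:
--         for j in data:
--             if hasTheChars(i, j):
--                 b[i] += 1
--     return b
-- ===== SOURCE B (Python) =====
-- def merageData(a, data):
--     b = {}
--     for i in a:
--         for j in a:
--             if i != j and i + j not in b.keys() and j + i not in b.keys():
--                 b["".join(dict.fromkeys(i + j))] = 0
--     # inverted index: char -> set of word indices
--     index = {}
--     for idx, w in enumerate(data):
--         for c in w:
--             index.setdefault(c, set()).add(idx)
--     for k in b:
--         posting = None
--         for c in k:
--             s = index.get(c, set())
--             posting = s if posting is None else (posting & s)
--         b[k] = 0 if posting is None else len(posting)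
--     return b
-- ===== Notes on version B (the rewrite author's own statement) =====
-- stated objective: alternative
-- what changed: The counting phase is replaced by an inverted index: one pass over data records, per character, the set of word indices containing it, and each key's count is the size of the intersection of its characters' posting sets, instead of re-scanning all of data for every key.
import Mathlib
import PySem

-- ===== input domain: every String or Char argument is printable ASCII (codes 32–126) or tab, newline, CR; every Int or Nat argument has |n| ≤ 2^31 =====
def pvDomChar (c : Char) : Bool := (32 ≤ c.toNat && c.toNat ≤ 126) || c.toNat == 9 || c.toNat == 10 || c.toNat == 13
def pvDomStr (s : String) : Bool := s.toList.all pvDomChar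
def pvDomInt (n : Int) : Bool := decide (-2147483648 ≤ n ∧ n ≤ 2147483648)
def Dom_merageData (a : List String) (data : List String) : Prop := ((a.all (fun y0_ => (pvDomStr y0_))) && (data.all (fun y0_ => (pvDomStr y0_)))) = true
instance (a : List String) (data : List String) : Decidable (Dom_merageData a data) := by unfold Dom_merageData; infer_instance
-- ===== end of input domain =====

-- B replaces A's per-key scan over all of data by an inverted index (char -> set of word
-- indices) built in one pass; each key's count is the size of the intersection of its
-- characters' posting sets (objective: alternative algorithm; return value only, no mutation).

-- ===== PORT A =====
-- helper hasTheChars: the loop carries isFound and returns False on the first missing char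
def hasTheCharsGo (word : List Char) : List Char → Bool → Bool
  | [], isFound => isFound
  | i :: rest, _ => if word.contains i then hasTheCharsGo word rest true else false

def hasTheChars (subString word : List Char) : Bool := hasTheCharsGo word subString false

-- "".join(OrderedDict.fromkeys(s))
def removeRepeatedChars (s : List Char) : List Char := PySem.List.dedup s

-- the first loop of merageData (textually identical in A and in B, so shared):
-- keys are strings, represented as List Char
def pairKeys (a : List String) : PySem.Dict (List Char) Int :=
  a.foldl (fun b i =>
    a.foldl (fun b j =>
      if i != j && !(b.contains (i.toList ++ j.toList)) && !(b.contains (j.toList ++ i.toList))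
      then b.insert (removeRepeatedChars (i.toList ++ j.toList)) 0
      else b) b) PySem.Dict.empty

-- for i in b: for j in data: if hasTheChars(i, j): b[i] += 1
def merageData (a : List String) (data : List String) : List (String × Int) :=
  (((pairKeys a).keys.foldl (fun b i =>
    data.foldl (fun b j =>
      if hasTheChars i j.toList then b.insert i (b.getD i 0 + 1) else b) b)
    (pairKeys a)).items).map (fun p => (String.ofList p.1, p.2))

-- ===== PORT B =====
-- index = {}; for idx, w in enumerate(data): for c in w: index.setdefault(c, set()).add(idx)
def buildIndex (data : List String) : PySem.Dict Char (PySem.Set Int) :=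
  (PySem.List.enumerate data).foldl (fun index p =>
    p.2.toList.foldl (fun index c =>
      index.modify c PySem.Set.empty (fun s => PySem.Set.add s p.1)) index) PySem.Dict.empty

-- posting = None; for c in k: s = index.get(c, set()); posting = s if posting is None else posting & s
def postingCount (index : PySem.Dict Char (PySem.Set Int)) (k : List Char) : Int :=
  match k.foldl (fun posting c =>
      let s := index.getD c PySem.Set.empty
      some (match posting with
            | none => s
            | some p => PySem.Set.inter p s)) none with
  | none => 0
  | some p => PySem.Set.len p

def merageData_alt (a : List String) (data : List String) : List (String × Int) :=
  (((pairKeys a).keys.foldl (fun b k => b.insert k (postingCount (buildIndex data) k))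
    (pairKeys a)).items).map (fun p => (String.ofList p.1, p.2))

-- ===== PRECONDITION & SPEC =====
def Spec_merageData (a : List String) (data : List String) (out : List (String × Int)) : Prop := out = merageData_alt a data
instance (a : List String) (data : List String) (out : List (String × Int)) : Decidable (Spec_merageData a data out) := by unfold Spec_merageData; infer_instance

-- ===== CLAIM (what is proved, stated in full; the proofs are below) =====
def Claim_equal_merageData : Prop := ∀ (a : List String) (data : List String), Dom_merageData a data → Spec_merageData a data (merageData a data)

-- ===== LEMMAS AND PROOFS =====

-- hasTheChars on a nonempty key is "the word contains every char of the key"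
lemma hasTheCharsGo_true (word : List Char) : ∀ l : List Char,
    hasTheCharsGo word l true = l.all (fun c => word.contains c) := by
  intro l; induction l with
  | nil => rfl
  | cons c rest ih =>
    by_cases h : word.contains c <;> simp [hasTheCharsGo, h, ih]

lemma hasTheChars_cons (word : List Char) (c : Char) (cs : List Char) :
    hasTheChars (c :: cs) word = (c :: cs).all (fun x => word.contains x) := by
  unfold hasTheChars
  by_cases h : word.contains c <;> simp [hasTheCharsGo, h, hasTheCharsGo_true]

lemma hasTheChars_nil (word : List Char) : hasTheChars [] word = false := rfl

-- generic foldl invariant preservation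
lemma foldl_pres {α σ : Type} (step : σ → α → σ) (P : σ → Prop)
    (h : ∀ s x, P s → P (step s x)) : ∀ (l : List α) (s : σ), P s → P (l.foldl step s) := by
  intro l; induction l with
  | nil => intro s hs; exact hs
  | cons x t ih => intro s hs; exact ih _ (h s x hs)

-- pairKeys: keys are nodup and every stored value is 0
lemma pairKeys_inv (a : List String) :
    (pairKeys a).keys.Nodup ∧ ∀ k, (pairKeys a).getD k 0 = 0 := by
  unfold pairKeys
  apply foldl_pres _ (fun b : PySem.Dict (List Char) Int => b.keys.Nodup ∧ ∀ k, b.getD k 0 = 0)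
  · intro b i hb
    apply foldl_pres _ (fun b : PySem.Dict (List Char) Int => b.keys.Nodup ∧ ∀ k, b.getD k 0 = 0)
    · intro b j hb
      split
      · refine ⟨PySem.Dict.nodup_keys_insert _ _ _ hb.1, fun k => ?_⟩
        by_cases hk : k = removeRepeatedChars (i.toList ++ j.toList)
        · subst hk; simp [PySem.Dict.getD_insert_self]
        · rw [PySem.Dict.getD_insert_of_ne _ _ _ hk]; exact hb.2 k
      · exact hb
    · exact hb
  · exact ⟨by simp [PySem.Dict.empty, PySem.Dict.keys], fun k => PySem.Dict.getD_empty _ _⟩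

-- replacing the (unique) entry at key k by its own first-found value is the identity
lemma map_replace_self {κ ν : Type} [BEq κ] [LawfulBEq κ] (k : κ) (v : ν) :
    ∀ l : List (κ × ν), (l.map Prod.fst).Nodup →
    (l.find? (fun p => p.1 == k)).map (·.2) = some v →
    l.map (fun p => if p.1 == k then (k, v) else p) = l := by
  intro l; induction l with
  | nil => intro _ h; simp at h
  | cons p t ih =>
    intro hn hv
    simp only [List.map_cons, List.nodup_cons] at hn ⊢
    by_cases hc : p.1 = k
    · subst hc
      rw [List.find?_cons_of_pos (by simp)] at hv
      simp only [Option.map_some, Option.some.injEq] at hv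
      subst hv
      have ht : ∀ q ∈ t, (if q.1 == p.1 then (p.1, p.2) else q) = q := by
        intro q hq
        have hne : q.1 ≠ p.1 := fun h => hn.1 (h ▸ List.mem_map_of_mem hq)
        simp [hne]
      rw [List.map_congr_left ht, List.map_id']
      simp
    · have hcb : (p.1 == k) = false := by simp [hc]
      rw [List.find?_cons_of_neg (by simp [hc])] at hv
      simp [hcb, ih hn.2 hv]

lemma insert_getD_self {κ ν : Type} [BEq κ] [LawfulBEq κ] (d : PySem.Dict κ ν) (k : κ) (dflt : ν)
    (h : d.contains k = true) (hn : d.keys.Nodup) : d.insert k (d.getD k dflt) = d := by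
  have hfind : (d.items.find? (fun p => p.1 == k)).isSome := by
    simp only [PySem.Dict.contains, List.any_eq_true] at h
    rcases h with ⟨p, hp, hpk⟩
    exact List.find?_isSome.2 ⟨p, hp, hpk⟩
  rcases Option.isSome_iff_exists.1 hfind with ⟨p, hp⟩
  have hgd : d.getD k dflt = p.2 := by
    simp [PySem.Dict.getD, PySem.Dict.get?, hp]
  apply PySem.Dict.ext
  simp only [PySem.Dict.insert, h, if_pos]
  exact map_replace_self k _ d.items hn (by simp [hp, hgd])

-- A's inner loop over data just adds the count to the value at k
lemma innerA (k : List Char) : ∀ (data : List String) (d : PySem.Dict (List Char) Int),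
    d.contains k = true → d.keys.Nodup →
    data.foldl (fun b j => if hasTheChars k j.toList then b.insert k (b.getD k 0 + 1) else b) d
      = d.insert k (d.getD k 0 + (data.countP (fun j => hasTheChars k j.toList) : Int)) := by
  intro data; induction data with
  | nil => intro d hc hn; simpa using (insert_getD_self d k 0 hc hn).symm
  | cons j t ih =>
    intro d hc hn
    by_cases hj : hasTheChars k j.toList
    · simp only [List.foldl_cons, hj, if_pos]
      rw [ih _ (by simp [PySem.Dict.contains_insert, hc]) (PySem.Dict.nodup_keys_insert _ _ _ hn)]
      rw [PySem.Dict.getD_insert_self, PySem.Dict.insert_insert_self]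
      have : t.countP (fun j => hasTheChars k j.toList) + 1
           = (j :: t).countP (fun j => hasTheChars k j.toList) := by
        simp [List.countP_cons, hj]
      rw [← this]; push_cast; ring_nf
    · simp only [List.foldl_cons, hj, if_neg, Bool.false_eq_true, not_false_iff]
      rw [ih _ hc hn]
      have : t.countP (fun j => hasTheChars k j.toList)
           = (j :: t).countP (fun j => hasTheChars k j.toList) := by
        simp [List.countP_cons, hj]
      rw [this]

-- Set.add is idempotent
lemma set_add_add {α : Type} [BEq α] [LawfulBEq α] (s : PySem.Set α) (x : α) :
    PySem.Set.add (PySem.Set.add s x) x = PySem.Set.add s x := by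
  by_cases h : x ∈ s <;> simp [PySem.Set.add, PySem.Set.contains, h]

-- the per-word inner loop of buildIndex: add the word's index to each of its chars' postings
lemma wordFold (n : Int) (c : Char) : ∀ (w : List Char) (d : PySem.Dict Char (PySem.Set Int)),
    ((w.foldl (fun d c => d.modify c PySem.Set.empty (fun s => PySem.Set.add s n)) d).getD c PySem.Set.empty)
      = if c ∈ w then PySem.Set.add (d.getD c PySem.Set.empty) n else d.getD c PySem.Set.empty := by
  intro w; induction w with
  | nil => intro d; simp
  | cons c' t ih =>
    intro d
    simp only [List.foldl_cons, ih]
    by_cases hct : c ∈ t <;> by_cases hcc : c = c' <;>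
      simp [hct, hcc, PySem.Dict.getD_modify, set_add_add]

lemma set_add_of_not_mem {α : Type} [BEq α] [LawfulBEq α] (s : PySem.Set α) (x : α) (h : x ∉ s) :
    PySem.Set.add s x = s ++ [x] := by
  simp [PySem.Set.add, PySem.Set.contains, h]

-- characterization of buildIndex's postings
lemma buildIdx_getD (c : Char) : ∀ (data : List String) (s : Int) (d : PySem.Dict Char (PySem.Set Int)),
    (∀ c' : Char, ∀ x ∈ d.getD c' PySem.Set.empty, x < s) →
    ((PySem.List.enumerate data s).foldl (fun index p =>
        p.2.toList.foldl (fun index c =>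
          index.modify c PySem.Set.empty (fun s => PySem.Set.add s p.1)) index) d).getD c PySem.Set.empty
      = d.getD c PySem.Set.empty
        ++ ((PySem.List.enumerate data s).filter (fun p => p.2.toList.contains c)).map (·.1) := by
  intro data; induction data with
  | nil => intro s d h; simp [PySem.List.enumerate]
  | cons w t ih =>
    intro s d h
    rw [PySem.List.enumerate_cons]
    simp only [List.foldl_cons, List.filter_cons]
    have hinv : ∀ c' : Char, ∀ x ∈ (w.toList.foldl (fun index c =>
        index.modify c PySem.Set.empty (fun s' => PySem.Set.add s' s)) d).getD c' PySem.Set.empty, x < s + 1 := by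
      intro c' x hx
      rw [wordFold] at hx
      by_cases hw : c' ∈ w.toList
      · rw [if_pos hw] at hx
        rcases (PySem.Set.mem_add _ _ _).1 hx with hx | hx
        · exact lt_trans (h c' x hx) (by omega)
        · omega
      · rw [if_neg hw] at hx; exact lt_trans (h c' x hx) (by omega)
    rw [ih (s + 1) _ hinv, wordFold]
    by_cases hw : c ∈ w.toList
    · have hns : s ∉ d.getD c PySem.Set.empty := fun hs => lt_irrefl s (h c s hs)
      rw [if_pos hw, set_add_of_not_mem _ _ hns]
      simp [hw, List.contains_iff_mem]
    · rw [if_neg hw]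
      simp [hw, List.contains_iff_mem]

-- posting list of a char
def idxList (data : List String) (c : Char) : PySem.Set Int :=
  ((PySem.List.enumerate data 0).filter (fun p => p.2.toList.contains c)).map (·.1)

lemma buildIndex_getD (data : List String) (c : Char) :
    (buildIndex data).getD c PySem.Set.empty = idxList data c := by
  unfold buildIndex idxList
  rw [buildIdx_getD c data 0 PySem.Dict.empty (by intro c' x hx; simp [PySem.Dict.getD_empty] at hx)]
  simp [PySem.Dict.getD_empty, PySem.Set.empty]

-- the first components of enumerate are distinct
lemma nodup_fst_enumerate (data : List String) (s : Int) :
    ((PySem.List.enumerate data s).map (·.1)).Nodup := by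
  have h := PySem.List.pairwise_lt_enumerate data s
  exact List.pairwise_map.mpr (h.imp (fun hlt => ne_of_lt hlt))

-- intersecting two filtered-fst lists over the same nodup-fst master list
lemma inter_filter_fst (q r : Int × String → Bool) :
    ∀ enum : List (Int × String), ((enum.map (·.1)).Nodup) →
    PySem.Set.inter ((enum.filter q).map (·.1)) ((enum.filter r).map (·.1))
      = (enum.filter (fun p => q p && r p)).map (·.1) := by
  intro enum; induction enum with
  | nil => intro _; rfl
  | cons p t ih =>
    intro hn
    simp only [List.map_cons, List.nodup_cons] at hn
    have hsub : ∀ x ∈ (t.filter q).map (·.1), x ≠ p.1 := by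
      intro x hx he
      rcases List.mem_map.1 hx with ⟨u, hu, hux⟩
      apply hn.1
      rw [← he, ← hux]
      exact List.mem_map_of_mem (List.mem_of_mem_filter hu)
    have hrsub : p.1 ∉ (t.filter r).map (·.1) := by
      intro hx
      rcases List.mem_map.1 hx with ⟨u, hu, hux⟩
      apply hn.1
      rw [← hux]
      exact List.mem_map_of_mem (List.mem_of_mem_filter hu)
    unfold PySem.Set.inter at ih ⊢
    by_cases hq : q p <;> by_cases hr : r p <;>
      simp only [List.filter_cons, hq, hr, Bool.true_and, Bool.false_and, if_pos, if_neg,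
        Bool.false_eq_true, not_false_iff, List.map_cons]
    · -- q p, r p
      have hc : PySem.Set.contains (p.1 :: (t.filter r).map (·.1)) p.1 = true := by
        simp [PySem.Set.contains]
      rw [hc]
      simp only [if_true]
      congr 1
      rw [List.filter_congr (q := fun x => PySem.Set.contains ((t.filter r).map (·.1)) x)
        (fun x hx => by simp [PySem.Set.contains, hsub x hx])]
      exact ih hn.2
    · -- q p, ¬ r p
      have hc : PySem.Set.contains ((t.filter r).map (·.1)) p.1 = false := by
        simp [PySem.Set.contains, hrsub]
      rw [hc]
      simp only [Bool.false_eq_true, if_neg, not_false_iff]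
      exact ih hn.2
    · -- ¬ q p, r p
      rw [List.filter_congr (q := fun x => PySem.Set.contains ((t.filter r).map (·.1)) x)
        (fun x hx => by simp [PySem.Set.contains, hsub x hx])]
      exact ih hn.2
    · exact ih hn.2

-- the Option-carrying fold of postingCount, once started, is the plain intersection fold
lemma posting_fold_some (index : PySem.Dict Char (PySem.Set Int)) :
    ∀ (cs : List Char) (p : PySem.Set Int),
    cs.foldl (fun posting c =>
        let s := index.getD c PySem.Set.empty
        some (match posting with
              | none => s
              | some p => PySem.Set.inter p s)) (some p)
      = some (cs.foldl (fun p c => PySem.Set.inter p (index.getD c PySem.Set.empty)) p) := by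
  intro cs; induction cs with
  | nil => intro p; rfl
  | cons c t ih => intro p; simp only [List.foldl_cons]; exact ih _

-- folding intersections of posting lists = one filter by all the chars
lemma inter_fold_filter (data : List String) :
    ∀ (cs : List Char) (q : Int × String → Bool),
    cs.foldl (fun p c => PySem.Set.inter p (idxList data c))
        (((PySem.List.enumerate data 0).filter q).map (·.1))
      = ((PySem.List.enumerate data 0).filter
          (fun p => q p && cs.all (fun c => p.2.toList.contains c))).map (·.1) := by
  intro cs; induction cs with
  | nil => intro q; simp
  | cons c t ih =>
    intro q
    simp only [List.foldl_cons]
    rw [show idxList data c = ((PySem.List.enumerate data 0).filter (fun p => p.2.toList.contains c)).map (·.1) from rfl,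
        inter_filter_fst q _ _ (nodup_fst_enumerate data 0), ih]
    congr 1
    apply List.filter_congr
    intro p _
    simp [Bool.and_assoc]

-- countP over enumerate with a predicate on the second component
lemma countP_enumerate (data : List String) (g : String → Bool) :
    ((PySem.List.enumerate data 0).filter (fun p => g p.2)).length = data.countP g := by
  conv_rhs => rw [← PySem.List.map_snd_enumerate data 0]
  rw [List.countP_map, List.countP_eq_length_filter]
  rfl

-- MAIN: the inverted-index count equals A's per-key scan count
lemma postingCount_eq (data : List String) (k : List Char) :
    postingCount (buildIndex data) k = (data.countP (fun j => hasTheChars k j.toList) : Int) := by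
  cases k with
  | nil =>
    have h0 : data.countP (fun j => hasTheChars [] j.toList) = 0 :=
      List.countP_eq_zero.2 (by intro j _; simp [hasTheChars_nil])
    simp [postingCount, h0]
  | cons c cs =>
    unfold postingCount
    simp only [List.foldl_cons]
    rw [posting_fold_some]
    have h1 : (buildIndex data).getD c PySem.Set.empty = idxList data c := buildIndex_getD data c
    simp only [h1]
    have h2 : ∀ c', (buildIndex data).getD c' PySem.Set.empty = idxList data c' := buildIndex_getD data
    rw [PySem.List.foldl_congr_mem cs _
        (fun p c' => PySem.Set.inter p (idxList data c')) _
        (fun acc c' _ => by rw [h2])]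
    rw [show idxList data c = ((PySem.List.enumerate data 0).filter (fun p => p.2.toList.contains c)).map (·.1) from rfl]
    rw [inter_fold_filter data cs (fun p => p.2.toList.contains c)]
    simp only [PySem.Set.len, List.length_map]
    rw [show (fun p : Int × String => p.2.toList.contains c && cs.all (fun c' => p.2.toList.contains c'))
          = (fun p : Int × String => hasTheChars (c :: cs) p.2.toList) from ?_]
    · rw [countP_enumerate data (fun w => hasTheChars (c :: cs) w.toList)]
    · funext p; rw [hasTheChars_cons]; simp
  
-- the two counting loops produce the same dict
lemma loop2_eq (data : List String) :
    ∀ (ks : List (List Char)) (b : PySem.Dict (List Char) Int),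
    ks.Nodup → b.keys.Nodup →
    (∀ k ∈ ks, b.contains k = true ∧ b.getD k 0 = 0) →
    ks.foldl (fun b i =>
        data.foldl (fun b j =>
          if hasTheChars i j.toList then b.insert i (b.getD i 0 + 1) else b) b) b
      = ks.foldl (fun b k => b.insert k (postingCount (buildIndex data) k)) b := by
  intro ks; induction ks with
  | nil => intro b _ _ _; rfl
  | cons k t ih =>
    intro b hnd hbn hkv
    simp only [List.foldl_cons]
    rw [innerA k data b (hkv k (by simp)).1 hbn, (hkv k (by simp)).2,
        postingCount_eq data k, zero_add]
    apply ih _ (List.nodup_cons.1 hnd).2 (PySem.Dict.nodup_keys_insert _ _ _ hbn)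
    intro k' hk'
    have hne : k' ≠ k := fun h => (List.nodup_cons.1 hnd).1 (h ▸ hk')
    constructor
    · rw [PySem.Dict.contains_insert]
      simp [(hkv k' (by simp [hk'])).1]
    · rw [PySem.Dict.getD_insert_of_ne _ _ _ hne]
      exact (hkv k' (by simp [hk'])).2

-- ===== VERDICT (by name: the statement is the Claim_ definition above) =====
theorem merageData_spec : Claim_equal_merageData := by
  intro a data _
  unfold Spec_merageData merageData merageData_alt
  have hinv := pairKeys_inv a
  have hcont : ∀ k ∈ (pairKeys a).keys, (pairKeys a).contains k = true := by
    intro k hk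
    rw [PySem.Dict.contains_eq_decide_mem_keys]
    simp [hk]
  rw [loop2_eq data (pairKeys a).keys (pairKeys a) hinv.1 hinv.1
      (fun k hk => ⟨hcont k hk, hinv.2 k⟩)]
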